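-- pv_equiv track=rewrite | github.com/johnspurrier/INST326FinalProject | class10_15.py | deu
-- ===== SOURCE A (Python) =====
-- ONES = ["null", "ein", "zwei", "drei", "vier", "funf", "sechs", "sieben",
--         "acht", "neun", "zehn", "elf", "zwolf", "dreizehn", "vierzehn",
--         "funfzehn", "sechzen", "zeibzen", "achtzen", "neunzehn"]
--
-- TENS = ["", "zehn", "zwanzig", "dreibig", "vierzig", "funfzig", "sechzig",
--         "siebzig", "achtzig", "neunzig"]
--
-- def deu(num):
--     if num == 1:
--         return "eins"
--     if num < 20:
--         return ONES[num]
--     if num < 100: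
--         t, o = divmod(num, 10)
--         if o == 0:
--             return TENS[t]
--         return f"{ONES[o]}und{TENS[t]}"
--     if num < 1000:
--         h, r = divmod(num, 100)
--         hundreds = "hundert" if h == 1 else f"{ONES[h]}hundert"
--         if r == 0:
--             return hundreds
--         else:
--             return f"{hundreds}{deu(r)}"
--     t, r = divmod(num, 1000)
--     thousands = "tausend" if t == 1 else f"{deu(t)}tausend"
--     if r == 0:
--         return thousands
--     else:
--         return f"{thousands} {deu(r)}"
-- ===== SOURCE B (Python) =====
-- ONES = ["null", "ein", "zwei", "drei", "vier", "funf", "sechs", "sieben",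
--         "acht", "neun", "zehn", "elf", "zwolf", "dreizehn", "vierzehn",
--         "funfzehn", "sechzen", "zeibzen", "achtzen", "neunzehn"]
--
-- TENS = ["", "zehn", "zwanzig", "dreibig", "vierzig", "funfzig", "sechzig",
--         "siebzig", "achtzig", "neunzig"]
--
--
-- def under_thousand(n):
--     """Words for 1 <= n <= 999 (the recursive sub-hundred remainder included)."""
--     if n == 1:
--         return "eins"
--     if n < 20:
--         return ONES[n]
--     if n < 100:
--         t, o = divmod(n, 10)
--         return TENS[t] if o == 0 else f"{ONES[o]}und{TENS[t]}"
--     h, r = divmod(n, 100)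
--     s = "hundert" if h == 1 else f"{ONES[h]}hundert"
--     return s if r == 0 else s + under_thousand(r)
--
--
-- def deu(num):
--     if num == 0:
--         return "null"
--     # split into base-1000 chunks, most significant first
--     chunks = []
--     n = num
--     while n > 0:
--         n, c = divmod(n, 1000)
--         chunks.append(c)
--     chunks.reverse()
--     # a leading chunk 1 followed by more chunks reads as bare "tausend"
--     s = "" if (len(chunks) > 1 and chunks[0] == 1) else under_thousand(chunks[0])
--     for c in chunks[1:]:
--         s += "tausend"
--         if c:
--             s += " " + under_thousand(c)
--     return s
-- ===== Notes on version B (the rewrite author's own statement) =====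
-- stated objective: alternative
-- what changed: A formats by nested recursion deu(num//1000) at every magnitude; B splits the number once into base-1000 chunks with a divmod loop and renders them iteratively with a single sub-thousand formatter, folding 'tausend' and the spaced remainders left to right.
-- outside the precondition, e.g. on deu(-1): A returns 'neunzehn', B raises IndexError; on deu(-20): A returns 'null', B raises IndexError
import Mathlib
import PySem

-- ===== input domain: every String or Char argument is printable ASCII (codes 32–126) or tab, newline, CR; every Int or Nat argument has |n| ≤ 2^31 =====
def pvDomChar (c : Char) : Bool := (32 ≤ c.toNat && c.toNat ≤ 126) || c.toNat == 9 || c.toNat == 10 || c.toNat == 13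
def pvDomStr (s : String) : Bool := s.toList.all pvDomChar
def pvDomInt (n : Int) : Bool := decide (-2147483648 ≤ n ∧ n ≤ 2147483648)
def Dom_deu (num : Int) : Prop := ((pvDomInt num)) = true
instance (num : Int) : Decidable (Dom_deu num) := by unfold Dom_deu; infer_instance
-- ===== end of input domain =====

-- B is an iterative base-1000 chunk formatter (different decomposition, same cost);
-- equivalence is proved for num ≥ 0 (Pre_): on negatives A raises IndexError (num ≤ -21)
-- or returns negative-index wraparound words (-20 ≤ num ≤ -1) where B's chunk loop
-- yields no chunks and B raises IndexError.

-- ===== PORT A =====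
def ONES : List String :=
  ["null", "ein", "zwei", "drei", "vier", "funf", "sechs", "sieben",
   "acht", "neun", "zehn", "elf", "zwolf", "dreizehn", "vierzehn",
   "funfzehn", "sechzen", "zeibzen", "achtzen", "neunzehn"]

def TENS : List String :=
  ["", "zehn", "zwanzig", "dreibig", "vierzig", "funfzig", "sechzig",
   "siebzig", "achtzig", "neunzig"]

def deu (num : Int) : String :=
  if num = 1 then "eins"
  else if num < 20 then (PySem.List.pyGet? ONES num).getD ""   -- ONES[num]; none (IndexError) excluded by Pre_
  else if num < 100 then
    let t := PySem.Int.floordiv num 10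
    let o := PySem.Int.mod num 10
    if o = 0 then (PySem.List.pyGet? TENS t).getD ""
    else (PySem.List.pyGet? ONES o).getD "" ++ "und" ++ (PySem.List.pyGet? TENS t).getD ""
  else if num < 1000 then
    let h := PySem.Int.floordiv num 100
    let r := PySem.Int.mod num 100
    let hundreds := if h = 1 then "hundert" else (PySem.List.pyGet? ONES h).getD "" ++ "hundert"
    if r = 0 then hundreds else hundreds ++ deu r
  else
    let t := PySem.Int.floordiv num 1000
    let r := PySem.Int.mod num 1000
    let thousands := if t = 1 then "tausend" else deu t ++ "tausend"
    if r = 0 then thousands else thousands ++ " " ++ deu r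
termination_by num.toNat
decreasing_by
  · have h1 := PySem.Int.mod_nonneg num (b := 100) (by norm_num)
    have h2 := PySem.Int.mod_lt num (b := 100) (by norm_num)
    omega
  · rw [PySem.Int.floordiv_eq_ediv_of_pos (by norm_num)]
    omega
  · have h1 := PySem.Int.mod_nonneg num (b := 1000) (by norm_num)
    have h2 := PySem.Int.mod_lt num (b := 1000) (by norm_num)
    omega

-- ===== PORT B =====
-- words for the sub-thousand pieces (1 ≤ n ≤ 999), recursing on the sub-hundred remainder
def under_thousand (n : Int) : String :=
  if n = 1 then "eins"
  else if n < 20 then (PySem.List.pyGet? ONES n).getD ""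
  else if n < 100 then
    let t := PySem.Int.floordiv n 10
    let o := PySem.Int.mod n 10
    if o = 0 then (PySem.List.pyGet? TENS t).getD ""
    else (PySem.List.pyGet? ONES o).getD "" ++ "und" ++ (PySem.List.pyGet? TENS t).getD ""
  else
    let h := PySem.Int.floordiv n 100
    let r := PySem.Int.mod n 100
    let s := if h = 1 then "hundert" else (PySem.List.pyGet? ONES h).getD "" ++ "hundert"
    if r = 0 then s else s ++ under_thousand r
termination_by n.toNat
decreasing_by
  have h1 := PySem.Int.mod_nonneg n (b := 100) (by norm_num)
  have h2 := PySem.Int.mod_lt n (b := 100) (by norm_num)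
  omega

-- the 'while n > 0: n, c = divmod(n, 1000); chunks.append(c)' loop
def chunkLoop (n : Int) (acc : List Int) : List Int :=
  if 0 < n then
    chunkLoop (PySem.Int.floordiv n 1000) (acc ++ [PySem.Int.mod n 1000])
  else acc
termination_by n.toNat
decreasing_by
  rw [PySem.Int.floordiv_eq_ediv_of_pos (by norm_num)]
  omega

def deu_alt (num : Int) : String :=
  if num = 0 then "null"
  else
    let chunks := (chunkLoop num []).reverse
    -- a leading chunk 1 followed by more chunks reads as bare "tausend"
    let s :=
      if 1 < PySem.List.len chunks ∧ (PySem.List.pyGet? chunks 0).getD 0 = 1 then ""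
      else under_thousand ((PySem.List.pyGet? chunks 0).getD 0)
    (PySem.List.slice chunks (some 1) none).foldl
      (fun s c => (s ++ "tausend") ++ (if c ≠ 0 then " " ++ under_thousand c else "")) s

-- ===== PRECONDITION & SPEC =====
-- Pre_ excludes negative inputs: there A raises IndexError (num ≤ -21) or returns an
-- accidental negative-index wraparound word (-20 ≤ num ≤ -1, e.g. deu(-1) = 'neunzehn'),
-- while B's chunk loop finds no chunks and raises IndexError.
def Pre_deu (num : Int) : Prop := 0 ≤ num
instance (num : Int) : Decidable (Pre_deu num) := by unfold Pre_deu; infer_instance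
def pvWitness_deu : Int := (1234567)

def Spec_deu (num : Int) (out : String) : Prop := out = deu_alt num
instance (num : Int) (out : String) : Decidable (Spec_deu num out) := by unfold Spec_deu; infer_instance

-- ===== CLAIM (what is proved, stated in full; the proofs are below) =====
def Claim_equal_deu : Prop := ∀ (num : Int), Dom_deu num → Pre_deu num → Spec_deu num (deu num)

-- ===== LEMMAS AND PROOFS =====

-- the fold step of deu_alt, named for the proofs (definitionally deu_alt's lambda)
def fstep (s : String) (c : Int) : String :=
  (s ++ "tausend") ++ (if c ≠ 0 then " " ++ under_thousand c else "")

theorem deu_eq_under_thousand (n : Int) (h : n < 1000) : deu n = under_thousand n := by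
  generalize hm : n.toNat = m
  induction m using Nat.strong_induction_on generalizing n with
  | _ m IH =>
    rw [deu, under_thousand]
    have hr0 := PySem.Int.mod_nonneg n (b := 100) (by norm_num)
    have hr1 := PySem.Int.mod_lt n (b := 100) (by norm_num)
    split_ifs with h1 h2 h3 <;> try rfl
    simp only []
    rw [IH (PySem.Int.mod n 100).toNat (by omega) _ (by omega) rfl]

theorem chunkLoop_acc (n : Int) (acc : List Int) :
    chunkLoop n acc = acc ++ chunkLoop n [] := by
  generalize hm : n.toNat = m
  induction m using Nat.strong_induction_on generalizing n acc with
  | _ m IH =>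
    rw [chunkLoop]
    conv_rhs => rw [chunkLoop]
    split_ifs with h
    · have ht : (PySem.Int.floordiv n 1000).toNat < m := by
        rw [PySem.Int.floordiv_eq_ediv_of_pos (by norm_num)]; omega
      rw [IH _ ht _ (acc ++ [PySem.Int.mod n 1000]) rfl,
          IH _ ht _ ([] ++ [PySem.Int.mod n 1000]) rfl]
      simp
    · simp

theorem chunkLoop_pos (n : Int) (h : 0 < n) :
    chunkLoop n [] = PySem.Int.mod n 1000 :: chunkLoop (PySem.Int.floordiv n 1000) [] := by
  rw [chunkLoop, if_pos h, chunkLoop_acc]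
  simp

theorem chunkLoop_zero (n : Int) (h : n ≤ 0) : chunkLoop n [] = [] := by
  rw [chunkLoop, if_neg (by omega)]

theorem chunkLoop_small (n : Int) (h1 : 1 ≤ n) (h2 : n < 1000) : chunkLoop n [] = [n] := by
  rw [chunkLoop_pos n (by omega),
      PySem.Int.mod_eq_emod_of_pos (by norm_num),
      PySem.Int.floordiv_eq_ediv_of_pos (by norm_num)]
  rw [chunkLoop_zero _ (by omega)]
  congr 1
  omega

theorem chunkLoop_ne_nil (n : Int) (h : 1 ≤ n) : chunkLoop n [] ≠ [] := by
  rw [chunkLoop_pos n (by omega)]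
  simp

theorem chunkLoop_split (n : Int) (h : 1000 ≤ n) :
    (chunkLoop n []).reverse =
      (chunkLoop (PySem.Int.floordiv n 1000) []).reverse ++ [PySem.Int.mod n 1000] := by
  rw [chunkLoop_pos n (by omega)]
  simp

theorem floordiv_1000_pos (n : Int) (h : 1000 ≤ n) : 1 ≤ PySem.Int.floordiv n 1000 := by
  rw [PySem.Int.floordiv_eq_ediv_of_pos (by norm_num)]; omega

theorem floordiv_1000_toNat_lt (n : Int) (h : 1000 ≤ n) :
    (PySem.Int.floordiv n 1000).toNat < n.toNat := by
  rw [PySem.Int.floordiv_eq_ediv_of_pos (by norm_num)]; omega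

-- the inner rendering invariant: folding fstep over the tail chunks of t, seeded with
-- the embedded head rule, yields A's thousands prefix for t
theorem K_eq (t : Int) (h : 1 ≤ t) (c : Int) (ds : List Int)
    (hcs : (chunkLoop t []).reverse = c :: ds) :
    List.foldl fstep (if c = 1 then "" else under_thousand c) ds
      = if t = 1 then "" else deu t := by
  generalize hm : t.toNat = m
  induction m using Nat.strong_induction_on generalizing t c ds with
  | _ m IH =>
    by_cases hbig : 1000 ≤ t
    · -- t = t' * 1000 + r', chunks of t = chunks of t' ++ [r']
      have ht' := floordiv_1000_pos t hbig
      have hr0 := PySem.Int.mod_nonneg t (b := 1000) (by norm_num)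
      have hr1 := PySem.Int.mod_lt t (b := 1000) (by norm_num)
      obtain ⟨c', ds', hcd⟩ : ∃ c' ds',
          (chunkLoop (PySem.Int.floordiv t 1000) []).reverse = c' :: ds' := by
        rcases hh : (chunkLoop (PySem.Int.floordiv t 1000) []).reverse with _ | ⟨x, xs⟩
        · exact absurd (by simpa using hh) (chunkLoop_ne_nil _ ht')
        · exact ⟨x, xs, rfl⟩
      rw [chunkLoop_split t hbig, hcd] at hcs
      rw [List.cons_append] at hcs
      injection hcs with hc hds
      subst hc hds
      rw [List.foldl_append]
      rw [IH _ (hm ▸ floordiv_1000_toNat_lt t hbig) _ ht' _ _ hcd rfl]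
      rw [if_neg (by omega : ¬ t = 1)]
      -- unfold one level of deu at t (the ≥ 1000 branch)
      conv_rhs => rw [deu]
      rw [if_neg (by omega : ¬ t = 1), if_neg (by omega : ¬ t < 20),
          if_neg (by omega : ¬ t < 100), if_neg (by omega : ¬ t < 1000)]
      simp only [List.foldl_cons, List.foldl_nil, fstep]
      rw [deu_eq_under_thousand (PySem.Int.mod t 1000) (by omega)]
      split_ifs with h1 h2 h3 <;>
        first
          | omega
          | (simp [String.empty_append, String.append_empty, String.append_assoc]
             try rw [show ("tausend " : String) = "tausend" ++ " " from rfl, String.append_assoc])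
    · -- 1 ≤ t < 1000: the chunk list is [t]
      rw [chunkLoop_small t h (by omega)] at hcs
      simp only [List.reverse_singleton] at hcs
      injection hcs with hc hds
      subst hc hds
      rw [deu_eq_under_thousand t (by omega)]
      simp only [List.foldl_nil]

theorem alt_eq_deu (n : Int) (h : 1 ≤ n) : deu_alt n = deu n := by
  rw [deu_alt, if_neg (by omega : ¬ n = 0)]
  simp only []
  by_cases hbig : 1000 ≤ n
  · have ht' := floordiv_1000_pos n hbig
    have hr0 := PySem.Int.mod_nonneg n (b := 1000) (by norm_num)
    have hr1 := PySem.Int.mod_lt n (b := 1000) (by norm_num)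
    obtain ⟨c, ds, hcd⟩ : ∃ c ds,
        (chunkLoop (PySem.Int.floordiv n 1000) []).reverse = c :: ds := by
      rcases hh : (chunkLoop (PySem.Int.floordiv n 1000) []).reverse with _ | ⟨x, xs⟩
      · exact absurd (by simpa using hh) (chunkLoop_ne_nil _ ht')
      · exact ⟨x, xs, rfl⟩
    rw [chunkLoop_split n hbig, hcd, List.cons_append]
    rw [PySem.List.slice_from_one, List.tail_cons]
    have hlen : (1 : Int) < PySem.List.len (c :: (ds ++ [PySem.Int.mod n 1000])) := by
      simp [PySem.List.len_eq]
    rw [PySem.List.pyGet?_zero_cons]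
    simp only [Option.getD_some]
    have hinit :
        (if 1 < PySem.List.len (c :: (ds ++ [PySem.Int.mod n 1000])) ∧ c = 1 then ""
         else under_thousand c) = (if c = 1 then "" else under_thousand c) := by
      split_ifs with h1 h2 <;> first | rfl | (exfalso; tauto)
    rw [hinit]
    rw [List.foldl_append]
    have hfun : (fun (s : String) (c : Int) =>
        (s ++ "tausend") ++ (if c ≠ 0 then " " ++ under_thousand c else "")) = fstep := rfl
    rw [hfun]
    rw [K_eq (PySem.Int.floordiv n 1000) ht' c ds hcd]
    conv_rhs => rw [deu]
    rw [if_neg (by omega : ¬ n = 1), if_neg (by omega : ¬ n < 20),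
        if_neg (by omega : ¬ n < 100), if_neg (by omega : ¬ n < 1000)]
    simp only [List.foldl_cons, List.foldl_nil, fstep]
    rw [deu_eq_under_thousand (PySem.Int.mod n 1000) (by omega)]
    split_ifs with h1 h2 h3 <;>
      first
        | omega
        | (simp [String.empty_append, String.append_empty, String.append_assoc]
           try rw [show ("tausend " : String) = "tausend" ++ " " from rfl, String.append_assoc])
  · rw [chunkLoop_small n h (by omega)]
    simp only [List.reverse_singleton]
    rw [PySem.List.slice_from_one, List.tail_cons]
    rw [PySem.List.pyGet?_zero_cons]
    simp only [Option.getD_some, List.foldl_nil]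
    rw [if_neg (by simp [PySem.List.len_eq])]
    exact (deu_eq_under_thousand n (by omega)).symm

-- ===== VERDICT (by name: the statement is the Claim_ definition above) =====
theorem deu_spec : Claim_equal_deu := by
  intro num _ hpre
  unfold Spec_deu
  rcases eq_or_lt_of_le hpre with h0 | h1
  · rw [← h0, deu_alt, if_pos rfl, deu, if_neg (by omega), if_pos (by omega)]
    rfl
  · exact (alt_eq_deu num (by omega)).symm
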